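-- pv_equiv track=rewrite | github.com/Yawn-Sean/Daily_CF_Problems | daily_problems/2024/06/0628/personal_submission/cf1321c_liryc.py | solve
-- ===== SOURCE A (Python) =====
-- from itertools import groupby
--
-- def solve(n: int, s: str) -> int:
--     a = []
--     for k, g in groupby(s):
--         c = sum(1 for _ in g)
--         a.append((ord(k) - 97, c))
--     ans = 0
--     for k in range(25, 0, -1):
--         for i in range(len(a) - 1, -1, -1):
--             if a[i][0] == k and ((i > 0 and a[i - 1][0] == k - 1) or (i < len(a) - 1 and a[i + 1][0] == k - 1)):
--                 ans += a[i][1]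
--                 a.pop(i)
--         for i in range(len(a) - 1, 0, -1):
--             if a[i][0] == a[i - 1][0]:
--                 a[i - 1] = (a[i][0], a[i - 1][1] + a[i][1])
--                 a.pop(i)
--     return ans
-- ===== SOURCE B (Python) =====
-- from itertools import groupby
--
-- def solve(n: int, s: str) -> int:
--     # Run-length encode once (as A does), then per letter k do ONE forward pass:
--     # a run of code k is removable iff an original neighbour run has code k-1
--     # (no two adjacent runs ever share a code), and surviving runs are coalesced
--     # on the fly with a stack -- no O(n) list.pop shifting, no second pass.
--     runs = [(ord(k) - 97, sum(1 for _ in g)) for k, g in groupby(s)]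
--     ans = 0
--     for k in range(25, 0, -1):
--         codes = [c for c, _ in runs]
--         prevs = [None] + codes
--         nexts = codes[1:] + [None]
--         kept = []
--         for (c, cnt), p, nx in zip(runs, prevs, nexts):
--             if c == k and (p == k - 1 or nx == k - 1):
--                 ans += cnt
--             elif kept and kept[-1][0] == c:
--                 kept[-1] = (c, kept[-1][1] + cnt)
--             else:
--                 kept.append((c, cnt))
--         runs = kept
--     return ans
-- ===== Notes on version B (the rewrite author's own statement) =====
-- stated objective: faster
-- what changed: Per letter k, A does two backward in-place passes with O(n) list.pop shifting (remove, then merge); B does one forward pass over (run, prev, next) triples that skips removable runs (testing the original neighbours, valid since adjacent runs never share a code) and coalesces survivors on a stack.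
import Mathlib
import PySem

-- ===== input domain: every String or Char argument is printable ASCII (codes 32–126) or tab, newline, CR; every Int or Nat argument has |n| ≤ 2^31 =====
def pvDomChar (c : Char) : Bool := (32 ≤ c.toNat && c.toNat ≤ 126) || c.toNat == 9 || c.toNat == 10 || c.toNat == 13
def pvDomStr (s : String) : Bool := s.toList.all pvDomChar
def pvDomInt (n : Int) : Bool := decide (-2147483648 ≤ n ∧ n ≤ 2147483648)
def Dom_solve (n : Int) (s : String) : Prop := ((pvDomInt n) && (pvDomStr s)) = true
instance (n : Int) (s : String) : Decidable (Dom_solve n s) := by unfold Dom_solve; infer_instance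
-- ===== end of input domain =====

-- B replaces A's per-letter backward pop/merge passes (O(n) shifting per pop) by one
-- forward pass per letter with original-neighbour tests and an on-the-fly coalescing stack.

-- ===== PORT A =====

-- shared input parsing: both Pythons build the run list with itertools.groupby(s)
def groupRuns : List Char → List (Int × Int)
  | [] => []
  | c :: rest =>
      ((c.toNat : Int) - 97, 1 + ((rest.takeWhile (fun d => d == c)).length : Int))
        :: groupRuns (rest.dropWhile (fun d => d == c))
  termination_by l => l.length
  decreasing_by
    have := List.length_dropWhile_le (fun d => d == c) rest
    simp; omega

def codeAt (a : List (Int × Int)) (i : Nat) : Int := (a.getD i (0, 0)).1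
def cntAt (a : List (Int × Int)) (i : Nat) : Int := (a.getD i (0, 0)).2

-- A's first inner loop: for i in range(len(a)-1, -1, -1): pop removable k-runs
def stage1A (k : Int) : Nat → List (Int × Int) × Int → List (Int × Int) × Int
  | 0, st => st
  | i + 1, (a, ans) =>
      if (codeAt a i == k) &&
         ((decide (0 < i) && (codeAt a (i - 1) == k - 1)) ||
          (decide (i + 1 < a.length) && (codeAt a (i + 1) == k - 1)))
      then stage1A k i (a.eraseIdx i, ans + cntAt a i)
      else stage1A k i (a, ans)

-- A's second inner loop: for i in range(len(a)-1, 0, -1): merge equal-code neighbours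
def stage2A : Nat → List (Int × Int) → List (Int × Int)
  | 0, a => a
  | i + 1, a =>
      if codeAt a (i + 1) == codeAt a i
      then stage2A i ((a.set i (codeAt a (i + 1), cntAt a i + cntAt a (i + 1))).eraseIdx (i + 1))
      else stage2A i a

def solve (n : Int) (s : String) : Int :=
  let a := groupRuns s.toList
  ((PySem.List.pyRange 25 0 (-1)).foldl
    (fun st k =>
      let st1 := stage1A k st.1.length st
      (stage2A (st1.1.length - 1) st1.1, st1.2))
    (a, 0)).2

-- ===== PORT B =====

-- kept[-1] merge-or-append step of B's stack
def stepMerge (kept : List (Int × Int)) (x : Int × Int) : List (Int × Int) :=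
  match kept.getLast? with
  | some la => if la.1 == x.1 then kept.dropLast ++ [(x.1, la.2 + x.2)] else kept ++ [x]
  | none => kept ++ [x]

-- one forward pass per letter k
def stageB (k : Int) (st : List (Int × Int) × Int) : List (Int × Int) × Int :=
  let runs := st.1
  let codes := runs.map Prod.fst
  let prevs : List (Option Int) := none :: codes.map some
  let nexts : List (Option Int) := (codes.drop 1).map some ++ [none]
  (runs.zip (prevs.zip nexts)).foldl
    (fun st2 t =>
      if t.1.1 == k && (t.2.1 == some (k - 1) || t.2.2 == some (k - 1))
      then (st2.1, st2.2 + t.1.2)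
      else (stepMerge st2.1 t.1, st2.2))
    ([], st.2)

def solve_alt (n : Int) (s : String) : Int :=
  ((PySem.List.pyRange 25 0 (-1)).foldl (fun st k => stageB k st) (groupRuns s.toList, 0)).2

-- ===== PRECONDITION & SPEC =====
def Spec_solve (n : Int) (s : String) (out : Int) : Prop := out = solve_alt n s
instance (n : Int) (s : String) (out : Int) : Decidable (Spec_solve n s out) := by unfold Spec_solve; infer_instance

-- ===== CLAIM (what is proved, stated in full; the proofs are below) =====
def Claim_equal_solve : Prop := ∀ (n : Int) (s : String), Dom_solve n s → Spec_solve n s (solve n s)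

-- ===== LEMMAS AND PROOFS =====

-- middle layer: removal with explicit left context and ORIGINAL right neighbour
def remO (k : Int) (left : Option Int) : List (Int × Int) → List (Int × Int) × Int
  | [] => ([], 0)
  | (c, m) :: t =>
      let r := remO k (some c) t
      if c == k && (left == some (k - 1) || t.head?.map Prod.fst == some (k - 1))
      then (r.1, r.2 + m)
      else ((c, m) :: r.1, r.2)

-- middle layer: right-to-left cascading merge
def push (x : Int × Int) (r : List (Int × Int)) : List (Int × Int) :=
  match r with
  | (c2, m2) :: t => if c2 == x.1 then (c2, x.2 + m2) :: t else x :: (c2, m2) :: t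
  | [] => [x]

def mergeR : List (Int × Int) → List (Int × Int)
  | [] => []
  | x :: t => push x (mergeR t)

-- A's removal loop with processed right context (current-list right neighbour)
def FA (k : Int) (left : Option Int) : List (Int × Int) → List (Int × Int) → List (Int × Int) × Int
  | [], q => (q, 0)
  | (c, m) :: p', q =>
      let r := FA k (some c) p' q
      if c == k && (left == some (k - 1) || r.1.head?.map Prod.fst == some (k - 1))
      then (r.1, r.2 + m)
      else ((c, m) :: r.1, r.2)

-- neighbour triples of a run list, given the code of the run to the left
def nbrs (left : Option Int) : List (Int × Int) → List ((Int × Int) × Option Int × Option Int)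
  | [] => []
  | x :: t => (x, left, t.head?.map Prod.fst) :: nbrs (some x.1) t

-- last code of p, falling back to `left`
def lastC (left : Option Int) (p : List (Int × Int)) : Option Int :=
  match p.getLast? with
  | some y => some y.1
  | none => left

-- combine a coalesced-stack prefix with an already-merged list
def mergeAcc (acc r : List (Int × Int)) : List (Int × Int) :=
  match acc.getLast?, r with
  | some la, (c2, m2) :: t =>
      if la.1 == c2 then acc.dropLast ++ (c2, la.2 + m2) :: t else acc ++ r
  | _, _ => acc ++ r

-- ---- small list-index lemmas ----
theorem getD_at_len (p q : List (Int × Int)) (x d : Int × Int) :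
    (p ++ x :: q).getD p.length d = x := by
  simp [List.getD]

theorem eraseIdx_at_len (p q : List (Int × Int)) (x : Int × Int) :
    (p ++ x :: q).eraseIdx p.length = p ++ q := by
  induction p with
  | nil => simp
  | cons a t ih => simp [ih]

theorem set_at_pred (p q : List (Int × Int)) (v : Int × Int) (h : p ≠ []) :
    (p ++ q).set (p.length - 1) v = p.dropLast ++ v :: q := by
  induction p with
  | nil => simp at h
  | cons a t ih =>
    cases t with
    | nil => simp
    | cons b t' => simpa using ih (by simp)

theorem lastC_cons (left : Option Int) (x : Int × Int) (t : List (Int × Int)) :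
    lastC left (x :: t) = lastC (some x.1) t := by
  unfold lastC
  cases t with
  | nil => simp
  | cons b t' =>
    cases hg : (b :: t').getLast? with
    | none => simp [List.getLast?_eq_none_iff] at hg
    | some y => simp [List.getLast?_cons_cons, hg]

theorem codeAt_pred (p q : List (Int × Int)) (left : Option Int) (h : p ≠ []) :
    some (codeAt (p ++ q) (p.length - 1)) = lastC left p := by
  induction p generalizing left with
  | nil => simp at h
  | cons a t ih =>
    rw [lastC_cons]
    cases t with
    | nil => simp [codeAt, lastC, List.getD]
    | cons b t' => simpa [codeAt] using ih (left := some a.1) (by simp)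


-- ---- B side ----
theorem zip_eq_nbrs (l : List (Int × Int)) (left : Option Int) :
    l.zip ((left :: (l.map Prod.fst).map some).zip
      (((l.map Prod.fst).drop 1).map some ++ [none])) = nbrs left l := by
  induction l generalizing left with
  | nil => simp [nbrs]
  | cons x t ih =>
    cases t with
    | nil => simp [nbrs]
    | cons y t' =>
      simp only [nbrs, List.map_cons, List.drop_succ_cons, List.zip_cons_cons, List.cons.injEq]
      simpa [List.map_map, nbrs, List.drop_succ_cons] using ih (left := some x.1)

theorem foldB_eq (k : Int) (l : List (Int × Int)) (left : Option Int)
    (kept : List (Int × Int)) (ans : Int) :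
    (nbrs left l).foldl
      (fun st2 t =>
        if t.1.1 == k && (t.2.1 == some (k - 1) || t.2.2 == some (k - 1))
        then (st2.1, st2.2 + t.1.2)
        else (stepMerge st2.1 t.1, st2.2))
      (kept, ans)
    = (List.foldl stepMerge kept (remO k left l).1, ans + (remO k left l).2) := by
  induction l generalizing left kept ans with
  | nil => simp [nbrs, remO]
  | cons x t ih =>
    obtain ⟨c, m⟩ := x
    simp only [nbrs, remO, List.foldl_cons]
    by_cases hd : (c == k && (left == some (k - 1) || t.head?.map Prod.fst == some (k - 1))) = true
    · rw [if_pos hd, if_pos hd, ih]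
      simp; ring
    · rw [if_neg hd, if_neg hd, ih]
      simp [List.foldl_cons]

theorem mergeAcc_nil (acc : List (Int × Int)) : mergeAcc acc [] = acc := by
  unfold mergeAcc
  cases acc.getLast? <;> simp

theorem mergeAcc_push (acc : List (Int × Int)) (x : Int × Int) (r : List (Int × Int)) :
    mergeAcc (stepMerge acc x) r = mergeAcc acc (push x r) := by
  obtain ⟨xc, xm⟩ := x
  cases hacc : acc.getLast? with
  | none =>
    have hae : acc = [] := List.getLast?_eq_none_iff.mp hacc
    subst hae
    cases r with
    | nil => simp [stepMerge, mergeAcc, push]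
    | cons h2 t =>
      obtain ⟨c2, m2⟩ := h2
      by_cases he : xc = c2
      · subst he; simp [stepMerge, mergeAcc, push]
      · simp [stepMerge, mergeAcc, push, he, Ne.symm he]
  | some la =>
    obtain ⟨lc, lm⟩ := la
    by_cases h1 : lc = xc
    · subst h1
      have hsm : stepMerge acc (lc, xm) = acc.dropLast ++ [(lc, lm + xm)] := by
        simp [stepMerge, hacc]
      cases r with
      | nil =>
        rw [mergeAcc_nil, hsm]
        simp [push, mergeAcc, hacc]
      | cons h2 t =>
        obtain ⟨c2, m2⟩ := h2
        by_cases he : lc = c2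
        · subst he
          rw [hsm]
          simp [mergeAcc, push, hacc, List.getLast?_concat, List.dropLast_concat]
          ring
        · rw [hsm]
          simp [mergeAcc, push, hacc, he, Ne.symm he, List.getLast?_concat, List.dropLast_concat]
    · have hsm : stepMerge acc (xc, xm) = acc ++ [(xc, xm)] := by
        simp [stepMerge, hacc, h1]
      cases r with
      | nil =>
        rw [mergeAcc_nil, hsm]
        simp [push, mergeAcc, hacc, h1]
      | cons h2 t =>
        obtain ⟨c2, m2⟩ := h2
        by_cases he : xc = c2
        · subst he
          rw [hsm]
          simp [mergeAcc, push, hacc, h1, List.getLast?_concat, List.dropLast_concat]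
        · rw [hsm]
          simp [mergeAcc, push, hacc, h1, he, Ne.symm he, List.getLast?_concat, List.dropLast_concat]

theorem foldl_stepMerge (l acc : List (Int × Int)) :
    List.foldl stepMerge acc l = mergeAcc acc (mergeR l) := by
  induction l generalizing acc with
  | nil => simp [mergeR, mergeAcc_nil]
  | cons x t ih =>
    simp only [List.foldl_cons, mergeR]
    rw [ih, mergeAcc_push]

theorem stageB_eq (k : Int) (l : List (Int × Int)) (ans : Int) :
    stageB k (l, ans) = (mergeR (remO k none l).1, ans + (remO k none l).2) := by
  unfold stageB
  simp only []
  rw [zip_eq_nbrs l none, foldB_eq k l none [] ans, foldl_stepMerge]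
  unfold mergeAcc
  cases h : (mergeR (remO k none l).1) <;> simp

-- ---- A side, removal loop ----
theorem FA_concat (k : Int) (p : List (Int × Int)) (x : Int × Int)
    (q : List (Int × Int)) (left : Option Int) :
    FA k left (p ++ [x]) q =
      (if x.1 == k && (lastC left p == some (k - 1) || q.head?.map Prod.fst == some (k - 1))
       then ((FA k left p q).1, (FA k left p q).2 + x.2)
       else FA k left p (x :: q)) := by
  induction p generalizing left with
  | nil =>
    obtain ⟨xc, xm⟩ := x
    simp only [List.nil_append, FA]
    rw [show lastC left [] = left from rfl]
    try (split <;> rfl)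
  | cons hd t ih =>
    obtain ⟨c, m⟩ := hd
    rw [lastC_cons]
    simp only [List.cons_append, FA]
    rw [ih (left := some c)]
    by_cases hx : (x.1 == k && (lastC (some c) t == some (k - 1) || q.head?.map Prod.fst == some (k - 1))) = true
    · rw [if_pos hx, if_pos hx]
      simp only [FA]
      split <;> simp [Prod.ext_iff] <;> ring
    · rw [if_neg hx, if_neg hx]
      try rfl

theorem getD_pred (p q : List (Int × Int)) (la : Int × Int) (hla : p.getLast? = some la) :
    (p ++ q).getD (p.length - 1) (0, 0) = la := by
  induction p with
  | nil => simp at hla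
  | cons a t ih =>
    cases t with
    | nil =>
      obtain rfl : a = la := by simpa using hla
      simp [List.getD]
    | cons b t' =>
      rw [List.getLast?_cons_cons] at hla
      simpa using ih hla

theorem condL (k : Int) (p' rest : List (Int × Int)) (v : Int) :
    (decide (0 < p'.length) && (codeAt (p' ++ rest) (p'.length - 1) == v)) = (lastC none p' == some v) := by
  cases hp : p' with
  | nil => simp [lastC]
  | cons a t =>
    have h := codeAt_pred (a :: t) rest none (by simp)
    rw [← hp] at h ⊢
    have hpos : 0 < p'.length := by rw [hp]; simp
    rw [decide_eq_true hpos, Bool.true_and]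
    cases hl : lastC none p' with
    | none => rw [hl] at h; simp at h
    | some w => rw [hl] at h; simp at h; simp [codeAt] at h ⊢; try rw [h]

theorem condR (p' q : List (Int × Int)) (x : Int × Int) (v : Int) :
    (decide (p'.length + 1 < (p' ++ x :: q).length) && (codeAt (p' ++ x :: q) (p'.length + 1) == v))
      = (q.head?.map Prod.fst == some v) := by
  cases q with
  | nil => simp
  | cons y q' =>
    have hlt : p'.length + 1 < (p' ++ x :: y :: q').length := by simp
    rw [decide_eq_true hlt, Bool.true_and]
    have : codeAt (p' ++ x :: y :: q') (p'.length + 1) = y.1 := by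
      have : p' ++ x :: y :: q' = (p' ++ [x]) ++ y :: q' := by simp
      rw [this, codeAt]
      have := getD_at_len (p' ++ [x]) q' y (0, 0)
      simp at this ⊢
      try rw [this]
    rw [this]
    simp

theorem stage1_eq (k : Int) (p q : List (Int × Int)) (ans : Int) :
    stage1A k p.length (p ++ q, ans) = ((FA k none p q).1, ans + (FA k none p q).2) := by
  induction p using List.reverseRecOn generalizing q ans with
  | nil => simp [stage1A, FA]
  | append_singleton p' x ih =>
    have hlen : (p' ++ [x]).length = p'.length + 1 := by simp
    rw [hlen, List.append_assoc, List.singleton_append]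
    simp only [stage1A]
    rw [show codeAt (p' ++ x :: q) p'.length = x.1 by simp [codeAt, getD_at_len],
        show cntAt (p' ++ x :: q) p'.length = x.2 by simp [cntAt, getD_at_len],
        condL k p' (x :: q) (k - 1), condR p' q x (k - 1),
        FA_concat k p' x q none]
    by_cases hb : (x.1 == k && (lastC none p' == some (k - 1) || q.head?.map Prod.fst == some (k - 1))) = true
    · rw [if_pos hb, if_pos hb, eraseIdx_at_len, ih]
      simp [Prod.ext_iff]; ring
    · rw [if_neg hb, if_neg hb, ih]

theorem remO_headcode (k : Int) (left : Option Int) (p : List (Int × Int))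
    (h : ∀ y ∈ p.head?, y.1 ≠ k) :
    ((remO k left p).1).head?.map Prod.fst = p.head?.map Prod.fst := by
  match p with
  | [] => simp [remO]
  | (c, m) :: t =>
    have hc : c ≠ k := by simpa using h (c, m) (by simp)
    simp only [remO]
    rw [if_neg (by simp [hc])]
    simp

theorem FA_eq_remO (k : Int) (p : List (Int × Int)) (left : Option Int)
    (hc : List.IsChain (fun a b => a.1 ≠ b.1) p) :
    FA k left p [] = remO k left p := by
  induction p generalizing left with
  | nil => rfl
  | cons hd t ih =>
    obtain ⟨c, m⟩ := hd
    obtain ⟨hhd, htl⟩ := List.isChain_cons.mp hc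
    simp only [FA, remO]
    rw [ih (some c) htl]
    by_cases hck : c = k
    · have hh : ∀ y ∈ t.head?, y.1 ≠ k := by
        intro y hy
        have := hhd y hy
        simp only at this
        omega
      rw [remO_headcode k (some c) t hh]
    · rw [if_neg (by simp [hck]), if_neg (by simp [hck])]

-- ---- A side, merge loop ----
theorem mergeR_ne_nil (l : List (Int × Int)) (h : l ≠ []) : mergeR l ≠ [] := by
  match l with
  | x :: t =>
    simp only [mergeR]
    match mergeR t with
    | [] => simp [push]
    | (c2, m2) :: t2 =>
      simp only [push]
      split <;> simp

theorem push_append_last (a x : Int × Int) (r : List (Int × Int)) (h : r ≠ []) :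
    push a (r ++ [x]) = push a r ++ [x] := by
  match r with
  | (c2, m2) :: t2 =>
    simp only [List.cons_append, push]
    split <;> simp

theorem mergeR_concat_ne (p : List (Int × Int)) (x : Int × Int)
    (h : p.getLast?.map Prod.fst ≠ some x.1) :
    mergeR (p ++ [x]) = mergeR p ++ [x] := by
  induction p with
  | nil => simp [mergeR, push]
  | cons a t ih =>
    cases t with
    | nil =>
      have ha : a.1 ≠ x.1 := by simpa using h
      simp only [List.cons_append, List.nil_append, mergeR, push]
      rw [if_neg (by simp [Ne.symm ha])]
    | cons b t' =>
      have h' : (b :: t').getLast?.map Prod.fst ≠ some x.1 := by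
        simpa [List.getLast?_cons_cons] using h
      show push a (mergeR ((b :: t') ++ [x])) = push a (mergeR (b :: t')) ++ [x]
      rw [ih h', push_append_last a x _ (mergeR_ne_nil _ (by simp))]

theorem mergeR_concat_eq (p : List (Int × Int)) (x la : Int × Int)
    (hl : p.getLast? = some la) (h : la.1 = x.1) :
    mergeR (p ++ [x]) = mergeR (p.dropLast ++ [(x.1, la.2 + x.2)]) := by
  induction p with
  | nil => simp at hl
  | cons a t ih =>
    cases t with
    | nil =>
      simp only [List.getLast?_singleton] at hl
      obtain rfl : a = la := by simpa using hl
      simp only [List.cons_append, List.nil_append, mergeR, push, List.dropLast_singleton]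
      rw [if_pos (by simp [h])]
    | cons b t' =>
      rw [List.getLast?_cons_cons] at hl
      show push a (mergeR ((b :: t') ++ [x])) = push a (mergeR ((b :: t').dropLast ++ [(x.1, la.2 + x.2)]))
      rw [ih hl]

theorem stage2_eq (n : Nat) (p q : List (Int × Int)) (hn : p.length = n) (h : p ≠ []) :
    stage2A (p.length - 1) (p ++ q) = mergeR p ++ q := by
  induction n using Nat.strong_induction_on generalizing p q with
  | _ n ihn =>
    rcases List.eq_nil_or_concat p with rfl | ⟨p', x, rfl⟩
    · simp at h
    · rcases List.eq_nil_or_concat p' with rfl | hne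
      · simp [stage2A, mergeR, push]
      · simp only [List.concat_eq_append] at hn h ⊢
        have hp' : p' ≠ [] := by rcases hne with ⟨_, _, rfl⟩; simp
        obtain ⟨m, hm⟩ : ∃ m, p'.length = m + 1 :=
          ⟨p'.length - 1, by cases p' with | nil => exact absurd rfl hp' | cons _ _ => simp⟩
        obtain ⟨la, hla⟩ : ∃ la, p'.getLast? = some la := by
          cases hgl : p'.getLast? with
          | none => exact absurd (List.getLast?_eq_none_iff.mp hgl) hp'
          | some y => exact ⟨y, rfl⟩
        have hn2 : n = m + 2 := by simp [hm] at hn; omega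
        have hplen : (p' ++ [x]).length - 1 = m + 1 := by simp [hm]
        rw [hplen, List.append_assoc, List.singleton_append]
        simp only [stage2A]
        have hga := getD_pred p' (x :: q) la hla
        rw [show p'.length - 1 = m from by omega] at hga
        have hcode1 : codeAt (p' ++ x :: q) (m + 1) = x.1 := by
          rw [← hm]; simp [codeAt, getD_at_len]
        have hcode0 : codeAt (p' ++ x :: q) m = la.1 := by unfold codeAt; rw [hga]
        have hcnt1 : cntAt (p' ++ x :: q) (m + 1) = x.2 := by
          rw [← hm]; simp [cntAt, getD_at_len]
        have hcnt0 : cntAt (p' ++ x :: q) m = la.2 := by unfold cntAt; rw [hga]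
        rw [hcode1, hcode0, hcnt1, hcnt0]
        by_cases hce : la.1 = x.1
        · rw [if_pos (by simp [hce])]
          have hset : (p' ++ x :: q).set m (x.1, la.2 + x.2)
              = (p'.dropLast ++ [(x.1, la.2 + x.2)]) ++ x :: q := by
            have hs := set_at_pred p' (x :: q) (x.1, la.2 + x.2) hp'
            rw [show p'.length - 1 = m from by omega] at hs
            rw [hs]; simp
          rw [hset]
          have hlen2 : (p'.dropLast ++ [(x.1, la.2 + x.2)]).length = m + 1 := by
            simp [hm]
          rw [show ((p'.dropLast ++ [(x.1, la.2 + x.2)]) ++ x :: q).eraseIdx (m + 1)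
              = (p'.dropLast ++ [(x.1, la.2 + x.2)]) ++ q from by
            rw [← hlen2]; exact eraseIdx_at_len _ _ _]
          have hrec := ihn (m + 1) (by omega) (p'.dropLast ++ [(x.1, la.2 + x.2)]) q hlen2 (by simp)
          rw [hlen2] at hrec
          simp only [Nat.add_sub_cancel] at hrec
          rw [hrec, mergeR_concat_eq p' x la hla hce]
        · rw [if_neg (by simp; omega)]
          have hrec := ihn (m + 1) (by omega) p' (x :: q) hm hp'
          rw [hm] at hrec
          simp only [Nat.add_sub_cancel] at hrec
          rw [hrec, mergeR_concat_ne p' x (by rw [hla]; simpa using fun hh => hce hh)]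
          simp

-- ---- invariant ----
theorem chain'_push (x : Int × Int) (r : List (Int × Int))
    (hc : List.IsChain (fun a b => a.1 ≠ b.1) r) :
    List.IsChain (fun a b => a.1 ≠ b.1) (push x r) := by
  match r with
  | [] => exact List.isChain_singleton x
  | (c2, m2) :: t =>
    obtain ⟨hhd, htl⟩ := List.isChain_cons.mp hc
    simp only [push]
    by_cases h2 : c2 = x.1
    · rw [if_pos (by simp [h2])]
      exact List.isChain_cons.mpr ⟨hhd, htl⟩
    · rw [if_neg (by simp [h2])]
      exact List.isChain_cons.mpr ⟨by intro y hy; simp at hy; simp [← hy]; omega, hc⟩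

theorem chain'_mergeR (l : List (Int × Int)) :
    List.IsChain (fun a b => a.1 ≠ b.1) (mergeR l) := by
  induction l with
  | nil => exact List.isChain_nil
  | cons x t ih => exact chain'_push x (mergeR t) ih

theorem chain'_groupRuns (cs : List Char) :
    List.IsChain (fun a b => a.1 ≠ b.1) (groupRuns cs) := by
  induction cs using groupRuns.induct with
  | case1 => rw [groupRuns]; exact List.isChain_nil
  | case2 c rest ih =>
    rw [groupRuns]
    refine List.isChain_cons.mpr ⟨?_, ih⟩
    intro y hy
    cases hdw : rest.dropWhile (fun d => d == c) with
    | nil => rw [hdw] at hy; simp [groupRuns] at hy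
    | cons d t2 =>
      rw [hdw] at hy
      rw [groupRuns] at hy
      simp only [List.head?_cons, Option.mem_def, Option.some.injEq] at hy
      have hd : ¬(d == c) = true := by
        have := List.head_dropWhile_not (fun d => d == c) (l := rest) (by simp [hdw])
        simpa [hdw] using this
      have hdc : d ≠ c := by simpa using hd
      have : d.toNat ≠ c.toNat := fun hEq => hdc (by
        apply Char.ext; exact UInt32.toNat_inj.mp hEq)
      rw [← hy]
      simp only
      omega

-- ---- putting the stages together ----
theorem stageA_eq (k : Int) (l : List (Int × Int)) (ans : Int)
    (hc : List.IsChain (fun a b => a.1 ≠ b.1) l) :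
    (stage2A ((stage1A k l.length (l, ans)).1.length - 1) (stage1A k l.length (l, ans)).1,
      (stage1A k l.length (l, ans)).2)
    = stageB k (l, ans) := by
  have h1 : stage1A k l.length (l, ans) = ((remO k none l).1, ans + (remO k none l).2) := by
    have := stage1_eq k l [] ans
    rw [List.append_nil] at this
    rw [this, FA_eq_remO k l none hc]
  rw [h1, stageB_eq]
  simp only []
  cases hR : (remO k none l).1 with
  | nil => simp [stage2A, mergeR]
  | cons y t =>
    have := stage2_eq (y :: t).length (y :: t) [] rfl (by simp)
    rw [List.append_nil, List.append_nil] at this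
    rw [this]

theorem fold_eq (ks : List Int) (l : List (Int × Int)) (ans : Int)
    (hc : List.IsChain (fun a b => a.1 ≠ b.1) l) :
    ks.foldl
      (fun st k =>
        let st1 := stage1A k st.1.length st
        (stage2A (st1.1.length - 1) st1.1, st1.2)) (l, ans)
    = ks.foldl (fun st k => stageB k st) (l, ans) := by
  induction ks generalizing l ans with
  | nil => rfl
  | cons k ks ih =>
    simp only [List.foldl_cons]
    rw [show (let st1 := stage1A k (l, ans).1.length (l, ans)
        (stage2A (st1.1.length - 1) st1.1, st1.2)) = stageB k (l, ans) from stageA_eq k l ans hc]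
    rw [stageB_eq]
    exact ih _ _ (chain'_mergeR _)

-- ===== VERDICT (by name: the statement is the Claim_ definition above) =====
theorem solve_spec : Claim_equal_solve := by
  intro n s _
  unfold Spec_solve solve solve_alt
  simp only []
  rw [fold_eq _ _ _ (chain'_groupRuns s.toList)]
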